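-- pv_equiv track=rewrite | github.com/RJScripts-24/InfraZero | ml-pipeline/ghosttrace/graph_encoder.py | build_degree_maps
-- ===== SOURCE A (Python) =====
-- from typing import Dict, Iterable, List, Sequence
--
-- def edge_source(edge: Dict) -> str:
--     """Return normalized edge source id."""
--
--     return str(edge.get("source", edge.get("from", "")))
--
-- def edge_target(edge: Dict) -> str:
--     """Return normalized edge target id."""
--
--     return str(edge.get("target", edge.get("to", "")))
--
-- def build_degree_maps(nodes: Sequence[Dict], edges: Sequence[Dict]) -> tuple[Dict[str, int], Dict[str, int]]:
--     """Build incoming and outgoing degree maps."""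
--
--     in_degree = {str(node.get("id", "")): 0 for node in nodes}
--     out_degree = {str(node.get("id", "")): 0 for node in nodes}
--
--     for edge in edges:
--         source = edge_source(edge)
--         target = edge_target(edge)
--         if source in out_degree:
--             out_degree[source] += 1
--         if target in in_degree:
--             in_degree[target] += 1
--
--     return in_degree, out_degree
-- ===== SOURCE B (Python) =====
-- def build_degree_maps(nodes, edges):
--     """Count all edge endpoints in one unguarded pass, then project the tallies onto the node ids."""
--     source_counts = {}
--     target_counts = {}
--     for edge in edges:
--         s = str(edge.get("source", edge.get("from", "")))
--         t = str(edge.get("target", edge.get("to", "")))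
--         source_counts[s] = source_counts.get(s, 0) + 1
--         target_counts[t] = target_counts.get(t, 0) + 1
--     in_degree = {str(node.get("id", "")): target_counts.get(str(node.get("id", "")), 0) for node in nodes}
--     out_degree = {str(node.get("id", "")): source_counts.get(str(node.get("id", "")), 0) for node in nodes}
--     return in_degree, out_degree
-- ===== Notes on version B (the rewrite author's own statement) =====
-- stated objective: idiomatic
-- what changed: B replaces A's zero-initialised maps mutated inside membership-guarded branches of the edge loop by an unguarded counting pass over all edge endpoints followed by dict comprehensions that project the tallies onto the node ids.
import Mathlib
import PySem

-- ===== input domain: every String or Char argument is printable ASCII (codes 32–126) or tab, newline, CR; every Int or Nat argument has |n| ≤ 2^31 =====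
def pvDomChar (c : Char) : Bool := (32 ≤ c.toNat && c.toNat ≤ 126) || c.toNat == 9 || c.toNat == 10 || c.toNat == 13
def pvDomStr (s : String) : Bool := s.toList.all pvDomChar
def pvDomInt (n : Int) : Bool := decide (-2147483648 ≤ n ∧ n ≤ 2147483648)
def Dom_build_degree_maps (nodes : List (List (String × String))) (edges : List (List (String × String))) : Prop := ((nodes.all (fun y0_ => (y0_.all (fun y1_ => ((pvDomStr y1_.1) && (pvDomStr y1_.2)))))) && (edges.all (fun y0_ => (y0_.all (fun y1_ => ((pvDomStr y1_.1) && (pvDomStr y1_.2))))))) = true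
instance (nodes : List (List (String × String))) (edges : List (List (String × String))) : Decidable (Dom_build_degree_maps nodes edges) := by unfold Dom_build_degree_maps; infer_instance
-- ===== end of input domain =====

-- B counts all edge endpoints in one unguarded pass and projects the tallies onto the node ids,
-- instead of A's membership-guarded increments; same result, different decomposition (idiomatic).

-- shared module helpers (edge_source / edge_target / node-id lookup; str() on a str is identity)
def pvGetS (d : List (String × String)) (k dflt : String) : String :=
  (PySem.Dict.ofList d).getD k dflt

def pvSrc (e : List (String × String)) : String := pvGetS e "source" (pvGetS e "from" "")
def pvTgt (e : List (String × String)) : String := pvGetS e "target" (pvGetS e "to" "")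
def pvId (n : List (String × String)) : String := pvGetS n "id" ""

-- ===== PORT A =====
def build_degree_maps (nodes : List (List (String × String))) (edges : List (List (String × String))) : (List (String × Int)) × (List (String × Int)) :=
  let in0 : PySem.Dict String Int := nodes.foldl (fun d n => d.insert (pvId n) 0) PySem.Dict.empty
  let out0 : PySem.Dict String Int := nodes.foldl (fun d n => d.insert (pvId n) 0) PySem.Dict.empty
  let p := edges.foldl (fun p e =>
    let s := pvSrc e
    let t := pvTgt e
    let od := if p.2.contains s then p.2.modify s 0 (· + 1) else p.2
    let id := if p.1.contains t then p.1.modify t 0 (· + 1) else p.1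
    (id, od)) (in0, out0)
  (p.1.items, p.2.items)

-- ===== PORT B =====
def build_degree_maps_alt (nodes : List (List (String × String))) (edges : List (List (String × String))) : (List (String × Int)) × (List (String × Int)) :=
  let cnts := edges.foldl (fun p e =>
    (p.1.insert (pvSrc e) (p.1.getD (pvSrc e) 0 + 1),
     p.2.insert (pvTgt e) (p.2.getD (pvTgt e) 0 + 1)))
    ((PySem.Dict.empty : PySem.Dict String Int), (PySem.Dict.empty : PySem.Dict String Int))
  let inD : PySem.Dict String Int := nodes.foldl (fun d n => d.insert (pvId n) (cnts.2.getD (pvId n) 0)) PySem.Dict.empty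
  let outD : PySem.Dict String Int := nodes.foldl (fun d n => d.insert (pvId n) (cnts.1.getD (pvId n) 0)) PySem.Dict.empty
  (inD.items, outD.items)

-- ===== PRECONDITION & SPEC =====
def Spec_build_degree_maps (nodes : List (List (String × String))) (edges : List (List (String × String))) (out : (List (String × Int)) × (List (String × Int))) : Prop := out = build_degree_maps_alt nodes edges
instance (nodes : List (List (String × String))) (edges : List (List (String × String))) (out : (List (String × Int)) × (List (String × Int))) : Decidable (Spec_build_degree_maps nodes edges out) := by unfold Spec_build_degree_maps; infer_instance

-- ===== CLAIM (what is proved, stated in full; the proofs are below) =====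
def Claim_equal_build_degree_maps : Prop := ∀ (nodes : List (List (String × String))) (edges : List (List (String × String))), Dom_build_degree_maps nodes edges → Spec_build_degree_maps nodes edges (build_degree_maps nodes edges)

-- ===== LEMMAS AND PROOFS =====

-- an insert-loop whose stored value depends only on the key
theorem get?_foldl_insert_keyval {β : Type} (l : List β) (key : β → String) (f : String → Int)
    (d : PySem.Dict String Int) (k : String) :
    (l.foldl (fun d n => d.insert (key n) (f (key n))) d).get? k
      = if k ∈ l.map key then some (f k) else d.get? k := by
  induction l generalizing d with
  | nil => simp
  | cons n l ih =>
    simp only [List.foldl_cons, ih, List.map_cons, List.mem_cons]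
    rw [PySem.Dict.get?_insert]
    by_cases h1 : k ∈ l.map key <;> by_cases h2 : k = key n <;> simp [h1, h2]

-- A's guarded increment loop: each present key gains the number of occurrences, keys unchanged
theorem get?_foldl_guard (l : List String) (d : PySem.Dict String Int) (k : String) :
    (l.foldl (fun d s => if d.contains s then d.modify s 0 (· + 1) else d) d).get? k
      = (d.get? k).map (· + (l.count k : Int)) := by
  induction l generalizing d with
  | nil => cases h : d.get? k <;> simp [h]
  | cons s l ih =>
    simp only [List.foldl_cons, ih]
    by_cases hc : d.contains s = true
    · have hmod : d.modify s 0 (· + 1) = d.insert s (d.getD s 0 + 1) := rfl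
      rw [if_pos hc, hmod]
      rw [PySem.Dict.get?_insert]
      by_cases hk : k = s
      · subst hk
        have : ∃ v, d.get? k = some v := by
          rcases h : d.get? k with _ | v
          · rw [PySem.Dict.contains_eq_isSome_get?, h] at hc; simp at hc
          · exact ⟨v, rfl⟩
        rcases this with ⟨v, hv⟩
        rw [PySem.Dict.getD_eq_get?_getD, hv]
        simp
        omega
      · simp [hk, Ne.symm hk]
    · simp only [hc]
      by_cases hk : k = s
      · subst hk
        have h0 : d.get? k = none := by
          rcases h : d.get? k with _ | v
          · rfl
          · rw [PySem.Dict.contains_eq_isSome_get?, h] at hc; simp at hc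
        simp [h0]
      · simp [Ne.symm hk]

theorem keys_foldl_guard (l : List String) (d : PySem.Dict String Int) :
    (l.foldl (fun d s => if d.contains s then d.modify s 0 (· + 1) else d) d).keys = d.keys := by
  induction l generalizing d with
  | nil => rfl
  | cons s l ih =>
    simp only [List.foldl_cons, ih]
    by_cases hc : d.contains s = true
    · have hmod : d.modify s 0 (· + 1) = d.insert s (d.getD s 0 + 1) := rfl
      rw [if_pos hc, hmod, PySem.Dict.keys_insert_of_contains d _ hc]
    · rw [if_neg hc]

-- two dicts with the same key list (Nodup) and the same lookups are equal
theorem dict_ext_keys_get? {d d' : PySem.Dict String Int}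
    (hk : d.keys = d'.keys) (hnd : d.keys.Nodup)
    (hg : ∀ k, d.get? k = d'.get? k) : d = d' := by
  apply PySem.Dict.ext
  have hnd' : d'.keys.Nodup := hk ▸ hnd
  have hlen : d.items.length = d'.items.length := by
    have := congrArg List.length hk
    simpa [PySem.Dict.keys] using this
  apply List.ext_getElem hlen
  intro i h1 h2
  have hk1 : d.items[i].1 = d'.items[i].1 := by
    have h := congrArg (fun l => l[i]?) hk
    simp only [PySem.Dict.keys, List.getElem?_map] at h
    simpa [List.getElem?_eq_getElem, h1, h2] using h
  have hm1 : (d.items[i].1, d.items[i].2) ∈ d.items := by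
    simp
  have hm2 : (d'.items[i].1, d'.items[i].2) ∈ d'.items := by
    simp
  have e1 := PySem.Dict.get?_of_mem_items d hm1 hnd
  have e2 := PySem.Dict.get?_of_mem_items d' hm2 hnd'
  rw [hg, hk1, e2] at e1
  have : d'.items[i].2 = d.items[i].2 := by simpa using e1
  exact Prod.ext hk1 this.symm

-- one side (in or out): A's guarded loop over 'ends' agrees with B's projection of the tally
theorem side_eq (nodes : List (List (String × String))) (ends : List String) (c : PySem.Dict String Int)
    (hc : ∀ k, c.getD k 0 = (ends.count k : Int)) :
    ends.foldl (fun d s => if d.contains s then d.modify s 0 (· + 1) else d)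
      (nodes.foldl (fun d n => d.insert (pvId n) 0) PySem.Dict.empty)
    = nodes.foldl (fun d n => d.insert (pvId n) (c.getD (pvId n) 0)) PySem.Dict.empty := by
  have hbase_nd : (nodes.foldl (fun d n => d.insert (pvId n) (0 : Int)) PySem.Dict.empty).keys.Nodup :=
    PySem.Dict.nodup_keys_foldl_insert_key nodes pvId (fun _ _ => 0) _ (by simp)
  apply dict_ext_keys_get?
  · rw [keys_foldl_guard]
    rw [PySem.Dict.keys_foldl_insert_key nodes pvId (fun _ _ => (0 : Int)),
        PySem.Dict.keys_foldl_insert_key nodes pvId (fun _ n => c.getD (pvId n) 0)]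
  · rw [keys_foldl_guard]; exact hbase_nd
  · intro k
    rw [get?_foldl_guard]
    rw [get?_foldl_insert_keyval nodes pvId (fun _ => (0 : Int)),
        get?_foldl_insert_keyval nodes pvId (fun k => c.getD k 0)]
    by_cases hm : k ∈ nodes.map pvId
    · simp [hm, hc k]
    · simp [hm, PySem.Dict.get?_empty]

-- ===== VERDICT (by name: the statement is the Claim_ definition above) =====
theorem build_degree_maps_spec : Claim_equal_build_degree_maps := by
  intro nodes edges _
  show build_degree_maps nodes edges = build_degree_maps_alt nodes edges
  unfold build_degree_maps build_degree_maps_alt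
  dsimp only
  rw [PySem.List.foldl_prod_mk
        (f := fun (d : PySem.Dict String Int) e => if d.contains (pvTgt e) then d.modify (pvTgt e) 0 (· + 1) else d)
        (g := fun (d : PySem.Dict String Int) e => if d.contains (pvSrc e) then d.modify (pvSrc e) 0 (· + 1) else d),
      PySem.List.foldl_prod_mk
        (f := fun (d : PySem.Dict String Int) e => d.insert (pvSrc e) (d.getD (pvSrc e) 0 + 1))
        (g := fun (d : PySem.Dict String Int) e => d.insert (pvTgt e) (d.getD (pvTgt e) 0 + 1))]
  have hfold : ∀ (key : List (String × String) → String),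
      edges.foldl (fun (d : PySem.Dict String Int) e => if d.contains (key e) then d.modify (key e) 0 (· + 1) else d)
          (nodes.foldl (fun d n => d.insert (pvId n) 0) PySem.Dict.empty)
        = (edges.map key).foldl (fun d s => if d.contains s then d.modify s 0 (· + 1) else d)
          (nodes.foldl (fun d n => d.insert (pvId n) 0) PySem.Dict.empty) := by
    intro key; rw [List.foldl_map]
  have hcnt : ∀ (key : List (String × String) → String) (k : String),
      (edges.foldl (fun (d : PySem.Dict String Int) e => d.insert (key e) (d.getD (key e) 0 + 1)) PySem.Dict.empty).getD k 0
        = ((edges.map key).count k : Int) := by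
    intro key k
    have h := PySem.Dict.getD_foldl_insert_add_one (edges.map key) PySem.Dict.empty k
    rw [List.foldl_map] at h
    simpa [PySem.Dict.getD_empty] using h
  simp only [Prod.mk.injEq]
  constructor
  · rw [hfold pvTgt, side_eq nodes (edges.map pvTgt) _ (hcnt pvTgt)]
  · rw [hfold pvSrc, side_eq nodes (edges.map pvSrc) _ (hcnt pvSrc)]
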